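-- pv_equiv track=rewrite | github.com/sylvia-ymlin/Leetcode | HW/josephus_problem.py | array_iterate
-- ===== SOURCE A (Python) =====
-- def array_iterate(n: int, input_array: list, m: int) -> list:
--     result = []
--     index = 0
--
--     while input_array:
--         # Count m positions starting from current position (counting starts from 1, so move m-1 steps)
--         index = (index + m - 1) % len(input_array)
--         # Get value at position, update m, and remove element
--         m = input_array.pop(index)
--         result.append(m)
--         # After removal, if index exceeds array length, need to adjust to beginning
--         # Note: If pop removes the last element, index == len(input_array)
--         # Next time should start from beginning, so keeping index as is will be handled by modulo next time
--         if index >= len(input_array) and input_array: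
--             index = 0
--
--     return result
-- ===== SOURCE B (Python) =====
-- def array_iterate(n: int, input_array: list, m: int) -> list:
--     # Rotation-based: keep the survivors in counting order with the next start at
--     # the front; each round take the element (m-1) mod len along, and rotate what
--     # follows it to the front.  No cursor index, no end-of-array adjustment.
--     # Return value only: unlike A, this does not empty the caller's list in place.
--     arr = list(input_array)
--     result = []
--     while arr:
--         k = (m - 1) % len(arr)
--         m = arr[k]
--         arr = arr[k+1:] + arr[:k]
--         result.append(m)
--     return result
-- ===== Notes on version B (the rewrite author's own statement) =====
-- stated objective: simpler
-- what changed: B drops A's cursor-index state and end-of-array adjustment entirely: it keeps the survivors rotated so counting always starts at the front, taking element (m-1) mod len and rotating the tail to the front each round (note: A empties the caller's list in place, B does not).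
import Mathlib
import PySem

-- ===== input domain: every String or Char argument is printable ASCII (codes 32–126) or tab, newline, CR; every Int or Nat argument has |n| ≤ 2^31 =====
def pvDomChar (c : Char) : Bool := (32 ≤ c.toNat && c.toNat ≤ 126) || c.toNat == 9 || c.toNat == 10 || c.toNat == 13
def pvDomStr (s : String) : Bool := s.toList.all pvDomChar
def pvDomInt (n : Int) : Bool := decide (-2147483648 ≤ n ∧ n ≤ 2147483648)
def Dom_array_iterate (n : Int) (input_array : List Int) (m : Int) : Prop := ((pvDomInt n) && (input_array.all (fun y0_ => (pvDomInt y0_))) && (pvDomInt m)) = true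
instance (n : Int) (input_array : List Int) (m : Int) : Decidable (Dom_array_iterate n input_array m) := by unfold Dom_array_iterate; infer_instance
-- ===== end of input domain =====

-- B replaces A's cursor index and end-of-array adjustment by keeping the survivors
-- rotated with the counting start at the front (objective: simpler). A empties the
-- caller's list in place; B does not — the equivalence proved is about the return value.

-- ===== PORT A =====
-- A's while-loop: cursor index, pop at (index+m-1) % len, reset index at the end.
def pvAAux (xs : List Int) (index m : Int) : List Int :=
  if hxs : xs = [] then []
  else
    let idx := PySem.Int.mod (index + m - 1) (xs.length : Int)
    match hp : PySem.List.pop? xs idx with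
    | none => []                       -- unreachable: 0 ≤ idx < len
    | some (v, rest) =>
      let idx' := if idx ≥ (rest.length : Int) ∧ rest ≠ [] then 0 else idx
      v :: pvAAux rest idx' v
termination_by xs.length
decreasing_by
  have h := PySem.List.length_of_pop?_eq_some _ hp
  simp at h
  omega

def array_iterate (n : Int) (input_array : List Int) (m : Int) : List Int :=
  pvAAux input_array 0 m

-- ===== PORT B =====
-- Source B's loop: take arr[(m-1) % len], then one rotation arr[k+1:] + arr[:k].
def pvBAux (xs : List Int) (m : Int) : List Int :=
  if hxs : xs = [] then []
  else
    let k := PySem.Int.mod (m - 1) (xs.length : Int)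
    match hv : PySem.List.pyGet? xs k with
    | none => []                       -- unreachable: 0 ≤ k < len
    | some v =>
      v :: pvBAux (PySem.List.slice xs (some (k+1)) none ++ PySem.List.slice xs none (some k)) v
termination_by xs.length
decreasing_by
  have hpos : (0:Int) < (xs.length : Int) := by
    have := List.length_pos_iff.mpr hxs; exact_mod_cast this
  have hk0 : (0:Int) ≤ k := PySem.Int.mod_nonneg _ hpos
  have hkL : k < (xs.length : Int) := PySem.Int.mod_lt _ hpos
  rw [PySem.List.slice_from _ (by omega), PySem.List.slice_to _ hk0]
  simp only [List.length_append, List.length_drop, List.length_take]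
  omega

def array_iterate_alt (n : Int) (input_array : List Int) (m : Int) : List Int :=
  pvBAux input_array m

-- ===== PRECONDITION & SPEC =====
def Spec_array_iterate (n : Int) (input_array : List Int) (m : Int) (out : List Int) : Prop := out = array_iterate_alt n input_array m
instance (n : Int) (input_array : List Int) (m : Int) (out : List Int) : Decidable (Spec_array_iterate n input_array m out) := by unfold Spec_array_iterate; infer_instance

-- ===== CLAIM (what is proved, stated in full; the proofs are below) =====
def Claim_equal_array_iterate : Prop := ∀ (n : Int) (input_array : List Int) (m : Int), Dom_array_iterate n input_array m → Spec_array_iterate n input_array m (array_iterate n input_array m)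

-- ===== LEMMAS AND PROOFS =====

-- One unfolding of A's loop body.
lemma pvAAux_step (xs : List Int) (index m : Int) (hxs : xs ≠ []) (v : Int) (rest : List Int)
    (hp : PySem.List.pop? xs (PySem.Int.mod (index + m - 1) (xs.length : Int)) = some (v, rest)) :
    pvAAux xs index m = v :: pvAAux rest
      (if PySem.Int.mod (index + m - 1) (xs.length : Int) ≥ (rest.length : Int) ∧ rest ≠ []
       then 0 else PySem.Int.mod (index + m - 1) (xs.length : Int)) v := by
  rw [pvAAux]
  simp only [dif_neg hxs]
  split
  · next heq => rw [hp] at heq; cases heq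
  · next v' rest' heq =>
      rw [hp] at heq
      injection heq with h2
      injection h2 with h3 h4
      subst h3; subst h4; rfl

-- One unfolding of B's loop body.
lemma pvBAux_step (xs : List Int) (m : Int) (hxs : xs ≠ []) (v : Int)
    (hv : PySem.List.pyGet? xs (PySem.Int.mod (m - 1) (xs.length : Int)) = some v) :
    pvBAux xs m = v :: pvBAux
      (PySem.List.slice xs (some (PySem.Int.mod (m - 1) (xs.length : Int) + 1)) none ++
       PySem.List.slice xs none (some (PySem.Int.mod (m - 1) (xs.length : Int)))) v := by
  rw [pvBAux]
  simp only [dif_neg hxs]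
  split
  · next heq => rw [hv] at heq; cases heq
  · next v' heq =>
      rw [hv] at heq
      injection heq with h2
      subst h2; rfl

-- A rotation by t < len starts with element t followed by the rest then the prefix.
lemma pv_rotate_cons (l : List Int) (t : Nat) (ht : t < l.length) :
    l.rotate t = l[t] :: (l.drop (t+1) ++ l.take t) := by
  have hd : List.drop t l = l[t] :: List.drop (t+1) l := (List.getElem_cons_drop ht).symm
  rw [List.rotate_eq_drop_append_take (le_of_lt ht), hd, List.cons_append]

-- Removing index j and rotating the remainder by j = the survivors in counting order.
lemma pv_rotate_eraseIdx (xs : List Int) (j : Nat) (hj : j < xs.length) :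
    (xs.eraseIdx j).rotate j = xs.drop (j+1) ++ xs.take j := by
  have hlen : (xs.take j).length = j := by simp; omega
  rw [List.eraseIdx_eq_take_drop_succ,
      List.rotate_eq_drop_append_take (by simp; omega),
      List.drop_left' hlen, List.take_left' hlen]

-- Main invariant: A's state (xs, index) corresponds to B's state xs.rotate index.
lemma pv_main : ∀ (L : Nat) (xs : List Int) (i m : Int), xs.length = L → 0 ≤ i →
    pvAAux xs i m = pvBAux (xs.rotate i.toNat) m := by
  intro L
  induction L using Nat.strong_induction_on with
  | _ L IH =>
  intro xs i m hL hi
  by_cases hxs : xs = []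
  · subst hxs; simp [pvAAux, pvBAux]
  · have hlen : 0 < xs.length := List.length_pos_iff.mpr hxs
    have hLpos : (0:Int) < (xs.length : Int) := by exact_mod_cast hlen
    -- A-side index
    have hmodA : PySem.Int.mod (i + m - 1) (xs.length : Int) = (i + m - 1) % (xs.length : Int) :=
      PySem.Int.mod_eq_emod_of_pos hLpos
    set idx := PySem.Int.mod (i + m - 1) (xs.length : Int) with hidxdef
    have hidx0 : 0 ≤ idx := PySem.Int.mod_nonneg _ hLpos
    have hidxL : idx < (xs.length : Int) := PySem.Int.mod_lt _ hLpos
    set j := idx.toNat with hjdef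
    have hj : j < xs.length := by omega
    have hcast : idx = (j : Int) := by omega
    have hpopA : PySem.List.pop? xs idx = some (xs[j], xs.eraseIdx j) := by
      rw [hcast]; exact PySem.List.pop?_natCast xs j hj
    rw [pvAAux_step xs i m hxs _ _ hpopA]
    -- B-side list
    have hrotne : xs.rotate i.toNat ≠ [] := by
      intro hc; apply hxs
      have := List.length_rotate xs i.toNat
      rw [hc] at this; simpa [List.length_eq_zero_iff] using this.symm
    have hrotlen : ((xs.rotate i.toNat).length : Int) = (xs.length : Int) := by
      simp [List.length_rotate]
    have hmodB : PySem.Int.mod (m - 1) ((xs.rotate i.toNat).length : Int) = (m - 1) % (xs.length : Int) := by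
      rw [hrotlen]; exact PySem.Int.mod_eq_emod_of_pos hLpos
    set k := PySem.Int.mod (m - 1) ((xs.rotate i.toNat).length : Int) with hkdef
    have hk0 : 0 ≤ k := by rw [hmodB]; exact Int.emod_nonneg _ (by omega)
    have hkL : k < (xs.length : Int) := by rw [hmodB]; exact Int.emod_lt_of_pos _ hLpos
    have hkltlen : k.toNat < (xs.rotate i.toNat).length := by
      rw [List.length_rotate]; omega
    -- rotating B's list by k = rotating xs by A's index j
    have hrot_eq : (xs.rotate i.toNat).rotate k.toNat = xs.rotate j := by
      rw [List.rotate_rotate, ← List.rotate_mod xs (i.toNat + k.toNat)]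
      congr 1
      have hInt : (((i.toNat + k.toNat) % xs.length : Nat) : Int) = (j : Int) := by
        push_cast
        rw [Int.toNat_of_nonneg hi, Int.toNat_of_nonneg hk0, ← hcast, hmodA, hmodB]
        have hsplit : i + m - 1 = i + (m - 1) := by ring
        rw [hsplit, Int.add_emod i (m - 1), Int.add_emod i ((m - 1) % (xs.length : Int)),
            Int.emod_emod_of_dvd _ dvd_rfl]
      exact_mod_cast hInt
    have hpair := ((pv_rotate_cons _ _ hkltlen).symm.trans hrot_eq).trans (pv_rotate_cons xs j hj)
    injection hpair with hhead htail
    have hget : PySem.List.pyGet? (xs.rotate i.toNat) k = some xs[j] := by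
      have hkN : k = ((k.toNat : Nat) : Int) := by omega
      rw [hkN, PySem.List.pyGet?_natCast, List.getElem?_eq_getElem hkltlen, hhead]
    rw [pvBAux_step _ m hrotne _ hget]
    have hslices : PySem.List.slice (xs.rotate i.toNat) (some (k + 1)) none ++
        PySem.List.slice (xs.rotate i.toNat) none (some k) = xs.drop (j+1) ++ xs.take j := by
      rw [PySem.List.slice_from _ (by omega), PySem.List.slice_to _ hk0]
      have h1 : (k + 1).toNat = k.toNat + 1 := by omega
      rw [h1]; exact htail
    rw [hslices]
    -- recursive step
    have herase : (xs.eraseIdx j).length = xs.length - 1 := by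
      simp [List.length_eraseIdx_of_lt hj]
    congr 1
    by_cases hcond : idx ≥ ((xs.eraseIdx j).length : Int) ∧ xs.eraseIdx j ≠ []
    · -- A resets its cursor to 0; here j = len-1 and rotating the remainder by j or by 0 is the same list
      rw [if_pos hcond]
      have hjtop : j = (xs.eraseIdx j).length := by omega
      have := IH (xs.eraseIdx j).length (by omega) (xs.eraseIdx j) 0 xs[j] rfl le_rfl
      rw [this]
      congr 1
      rw [Int.toNat_zero, List.rotate_zero, ← pv_rotate_eraseIdx xs j hj]
      have h2 := List.rotate_length (xs.eraseIdx j)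
      rw [← hjtop] at h2
      exact h2.symm
    · rw [if_neg hcond]
      have := IH (xs.eraseIdx j).length (by omega) (xs.eraseIdx j) idx xs[j] rfl hidx0
      rw [this]
      congr 1
      rw [hcast, Int.toNat_natCast, pv_rotate_eraseIdx xs j hj]

-- ===== VERDICT (by name: the statement is the Claim_ definition above) =====
theorem array_iterate_spec : Claim_equal_array_iterate := by
  intro _ xs m _
  unfold Spec_array_iterate array_iterate array_iterate_alt
  have h := pv_main xs.length xs 0 m rfl le_rfl
  simpa using h
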